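-- pv_equiv track=rewrite | github.com/cyrustabatab/DailyInterviewQuestion | find_missing_number.py | find_unique_arr
-- ===== SOURCE A (Python) =====
-- def find_unique_arr(a):
--
--     result_array = [0] * 32
--
--     for num in a:
--         for i in range(32):
--             result_array[i] += (num >> i) & 1
--
--     result = 0
--     for i,bit in enumerate(result_array):
--         if bit % 3 != 0:
--             result += 2**i
--
--     return result
-- ===== SOURCE B (Python) =====
-- def find_unique_arr(a):
--     ones = twos = 0
--     for num in a:
--         ones = (ones ^ num) & ~twos
--         twos = (twos ^ num) & ~ones
--     return (ones | twos) & 0xFFFFFFFF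
-- ===== Notes on version B (the rewrite author's own statement) =====
-- stated objective: faster
-- what changed: Replaced the per-number 32-iteration bit-count table and final power-of-two summation loop with the classic mod-3 two-variable bit state machine (ones/twos) in a single pass, masking the result to the low 32 bits.
import Mathlib
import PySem

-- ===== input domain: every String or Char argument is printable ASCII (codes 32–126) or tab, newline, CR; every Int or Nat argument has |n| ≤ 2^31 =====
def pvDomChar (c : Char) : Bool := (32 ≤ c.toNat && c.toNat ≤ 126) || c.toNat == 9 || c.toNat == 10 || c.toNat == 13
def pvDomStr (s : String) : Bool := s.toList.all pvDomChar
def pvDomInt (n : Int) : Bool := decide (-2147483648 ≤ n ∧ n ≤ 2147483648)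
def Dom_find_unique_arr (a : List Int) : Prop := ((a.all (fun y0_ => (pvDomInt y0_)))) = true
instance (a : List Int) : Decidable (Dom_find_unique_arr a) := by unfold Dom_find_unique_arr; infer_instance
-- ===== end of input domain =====

-- B replaces A's 32-iterations-per-element bit-count table with the classic single-pass
-- mod-3 two-variable (ones/twos) bit state machine, masked to the low 32 bits.

-- ===== PORT A =====
-- Lean's Int carries no &&& notation here, so Python's two's-complement '&' is Int.land and
-- '>>' is ℤ's arithmetic >>> (exact matches); enumerate indices are ≥ 0, so 2**i is 2 ^ i.toNat.
def find_unique_arr (a : List Int) : Int :=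
  let result_array : List Int := List.replicate 32 0
  let result_array := a.foldl (fun arr num =>
    (List.range 32).foldl (fun arr i =>
      arr.set i (arr.getD i 0 + Int.land (num >>> (i : Int)) 1)) arr) result_array
  (PySem.List.enumerate result_array).foldl
    (fun result p => if PySem.Int.mod p.2 3 ≠ 0 then result + 2 ^ p.1.toNat else result) 0

-- ===== PORT B =====
-- Python's ^, &, ~, | on int are Int.xor, Int.land, Int.lnot, Int.lor (two's complement, exact).
def find_unique_arr_alt (a : List Int) : Int :=
  let st := a.foldl (fun (p : Int × Int) num =>
    let ones := Int.land (Int.xor p.1 num) (Int.lnot p.2)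
    let twos := Int.land (Int.xor p.2 num) (Int.lnot ones)
    (ones, twos)) (0, 0)
  Int.land (Int.lor st.1 st.2) 0xFFFFFFFF

-- ===== PRECONDITION & SPEC =====
def Spec_find_unique_arr (a : List Int) (out : Int) : Prop := out = find_unique_arr_alt a
instance (a : List Int) (out : Int) : Decidable (Spec_find_unique_arr a out) := by unfold Spec_find_unique_arr; infer_instance

-- ===== CLAIM (what is proved, stated in full; the proofs are below) =====
def Claim_equal_find_unique_arr : Prop := ∀ (a : List Int), Dom_find_unique_arr a → Spec_find_unique_arr a (find_unique_arr a)

-- ===== LEMMAS AND PROOFS =====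
theorem ldiff_one (k : Nat) : Nat.ldiff 1 k = if k % 2 = 0 then 1 else 0 := by
  apply Nat.eq_of_testBit_eq
  intro j
  rw [Nat.testBit_ldiff]
  cases j with
  | zero => rcases Nat.mod_two_eq_zero_or_one k with h|h <;> simp [Nat.testBit, h]
  | succ j =>
    have h1 : Nat.testBit 1 (j+1) = false := by simp [Nat.testBit_succ]
    rcases Nat.mod_two_eq_zero_or_one k with h|h <;> simp [h1, h]

theorem bitval (num : Int) (i : Nat) :
    Int.land (num >>> (i : Int)) 1 = if num.testBit i then 1 else 0 := by
  have hnat : ∀ m : Nat, m.testBit i = (((m >>> i) % 2) == 1) := by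
    intro m; simp [Nat.testBit]
  cases num with
  | ofNat m =>
    have h0 : (Int.ofNat m) >>> (i : Int) = Int.ofNat (m >>> i) := Int.shiftRight_natCast m i
    rw [h0]
    have h1 : Int.land (Int.ofNat (m >>> i)) 1 = Int.ofNat ((m >>> i) &&& 1) := rfl
    have h2 : Int.testBit (Int.ofNat m) i = m.testBit i := rfl
    rw [h1, Nat.and_one_is_mod, h2, hnat]
    rcases Nat.mod_two_eq_zero_or_one (m >>> i) with h | h <;> simp [h]
  | negSucc m =>
    rw [Int.shiftRight_negSucc]
    have h1 : Int.land (Int.negSucc (m >>> i)) 1 = Int.ofNat (Nat.ldiff 1 (m >>> i)) := rfl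
    have h2 : Int.testBit (Int.negSucc m) i = !(m.testBit i) := rfl
    rw [h1, ldiff_one, h2, hnat]
    rcases Nat.mod_two_eq_zero_or_one (m >>> i) with h | h <;> simp [h]


theorem inner_len (num : Int) (n : Nat) (arr : List Int) :
    ((List.range n).foldl (fun arr i =>
      arr.set i (arr.getD i 0 + Int.land (num >>> (i : Int)) 1)) arr).length = arr.length := by
  induction n generalizing arr with
  | zero => rfl
  | succ n ih =>
    rw [List.range_succ, List.foldl_append]
    simp only [List.foldl_cons, List.foldl_nil, List.length_set]
    exact ih arr

theorem inner_getD_ge (num : Int) (n : Nat) (arr : List Int) (j : Nat) (hj : n ≤ j) :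
    ((List.range n).foldl (fun arr i =>
      arr.set i (arr.getD i 0 + Int.land (num >>> (i : Int)) 1)) arr).getD j 0 = arr.getD j 0 := by
  induction n generalizing arr with
  | zero => rfl
  | succ n ih =>
    rw [List.range_succ, List.foldl_append]
    simp only [List.foldl_cons, List.foldl_nil]
    rw [List.getD, List.getElem?_set_ne (by omega), ← List.getD]
    exact ih arr (by omega)

theorem inner_getD (num : Int) (n : Nat) (arr : List Int) (j : Nat) (hj : j < n) (hjl : j < arr.length) :
    ((List.range n).foldl (fun arr i =>
      arr.set i (arr.getD i 0 + Int.land (num >>> (i : Int)) 1)) arr).getD j 0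
      = arr.getD j 0 + (if num.testBit j then 1 else 0) := by
  induction n generalizing arr with
  | zero => omega
  | succ n ih =>
    rw [List.range_succ, List.foldl_append]
    simp only [List.foldl_cons, List.foldl_nil]
    set arr' := (List.range n).foldl (fun arr i =>
      arr.set i (arr.getD i 0 + Int.land (num >>> (i : Int)) 1)) arr with harr'
    have hlen : arr'.length = arr.length := inner_len num n arr
    by_cases h : j < n
    · rw [List.getD, List.getElem?_set_ne (by omega), ← List.getD]
      exact ih arr h hjl
    · have hjn : j = n := by omega
      subst hjn
      rw [List.getD, List.getElem?_set_self (by omega), Option.getD_some, bitval,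
        inner_getD_ge num j arr j le_rfl]

def cntBit (a : List Int) (j : Nat) : Nat := a.countP (fun n => n.testBit j)
theorem cntBit_cons (num : Int) (a : List Int) (j : Nat) :
    cntBit (num :: a) j = cntBit a j + (if num.testBit j then 1 else 0) := by
  simp [cntBit, List.countP_cons]

theorem outer_len (a : List Int) (arr : List Int) :
    (a.foldl (fun arr num => (List.range 32).foldl (fun arr i =>
      arr.set i (arr.getD i 0 + Int.land (num >>> (i : Int)) 1)) arr) arr).length = arr.length := by
  induction a generalizing arr with
  | nil => rfl
  | cons num a ih =>
    rw [List.foldl_cons]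
    rw [ih]
    exact inner_len num 32 arr

theorem outer_getD (a : List Int) (arr : List Int) (j : Nat) (hj : j < 32) (hjl : j < arr.length) :
    (a.foldl (fun arr num => (List.range 32).foldl (fun arr i =>
      arr.set i (arr.getD i 0 + Int.land (num >>> (i : Int)) 1)) arr) arr).getD j 0
      = arr.getD j 0 + (cntBit a j : Int) := by
  induction a generalizing arr with
  | nil => simp [cntBit]
  | cons num a ih =>
    rw [List.foldl_cons]
    rw [ih _ (by rw [inner_len]; omega)]
    rw [inner_getD num 32 arr j hj hjl, cntBit_cons]
    split <;> push_cast <;> ring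

theorem enumSum (g : Nat → Int → Int) :
    ∀ (arr : List Int) (s : Nat),
      ((PySem.List.enumerate arr (s : Int)).map (fun p => g p.1.toNat p.2)).sum
        = ∑ i ∈ Finset.range arr.length, g (s + i) (arr.getD i 0) := by
  intro arr
  induction arr with
  | nil => intro s; simp [PySem.List.enumerate_nil]
  | cons x xs ih =>
    intro s
    rw [PySem.List.enumerate_cons]
    simp only [List.map_cons, List.sum_cons]
    have : ((s : Int) + 1) = ((s + 1 : Nat) : Int) := by push_cast; ring
    rw [this, ih (s + 1)]
    rw [List.length_cons, Finset.sum_range_succ']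
    simp only [List.getD_cons_succ, List.getD_cons_zero, Int.toNat_natCast]
    rw [add_comm]
    congr 1
    apply Finset.sum_congr rfl
    intro i _
    congr 1
    omega


theorem A_closed (a : List Int) :
    find_unique_arr a = ∑ i ∈ Finset.range 32, (if cntBit a i % 3 ≠ 0 then ((2 : Int) ^ i) else 0) := by
  unfold find_unique_arr
  set arr := a.foldl (fun arr num => (List.range 32).foldl (fun arr i =>
      arr.set i (arr.getD i 0 + Int.land (num >>> (i : Int)) 1)) arr) (List.replicate 32 0) with harr
  have hlen : arr.length = 32 := by rw [harr, outer_len, List.length_replicate]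
  have hstep : (fun (result : Int) (p : Int × Int) =>
      if PySem.Int.mod p.2 3 ≠ 0 then result + 2 ^ p.1.toNat else result)
      = (fun result p => result + (if PySem.Int.mod p.2 3 ≠ 0 then 2 ^ p.1.toNat else 0)) := by
    funext r p; split <;> simp
  rw [hstep, PySem.List.foldl_add]
  have hes := enumSum (fun i v => if PySem.Int.mod v 3 ≠ 0 then 2 ^ i else 0) arr 0
  rw [Nat.cast_zero] at hes
  rw [hes, hlen, zero_add]
  apply Finset.sum_congr rfl
  intro i hi
  have hi32 : i < 32 := Finset.mem_range.mp hi
  have hget : arr.getD i 0 = (cntBit a i : Int) := by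
    rw [harr, outer_getD a (List.replicate 32 0) i hi32 (by simp [hi32]), List.getD_replicate _ hi32, zero_add]
  rw [hget, zero_add]
  have hmod : PySem.Int.mod ((cntBit a i : Nat) : Int) 3 = ((cntBit a i % 3 : Nat) : Int) := by
    rw [show (3:Int) = ((3:Nat):Int) from rfl, PySem.Int.mod_natCast]
  rw [hmod]
  by_cases h : cntBit a i % 3 = 0
  · have h' : ((cntBit a i % 3 : Nat) : Int) = 0 := by exact_mod_cast h
    rw [if_neg (by simp [h']), if_neg (by simp [h])]
  · have h' : ((cntBit a i % 3 : Nat) : Int) ≠ 0 := by exact_mod_cast h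
    rw [if_pos h', if_pos h]

theorem B_inv (a : List Int) :
    ∀ (o t : Int) (f : Nat → Nat),
      (∀ i, o.testBit i = decide (f i % 3 = 1)) →
      (∀ i, t.testBit i = decide (f i % 3 = 2)) →
      (∀ i, (a.foldl (fun (p : Int × Int) num =>
          let ones := Int.land (Int.xor p.1 num) (Int.lnot p.2)
          let twos := Int.land (Int.xor p.2 num) (Int.lnot ones)
          (ones, twos)) (o, t)).1.testBit i = decide ((f i + cntBit a i) % 3 = 1)) ∧
      (∀ i, (a.foldl (fun (p : Int × Int) num =>
          let ones := Int.land (Int.xor p.1 num) (Int.lnot p.2)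
          let twos := Int.land (Int.xor p.2 num) (Int.lnot ones)
          (ones, twos)) (o, t)).2.testBit i = decide ((f i + cntBit a i) % 3 = 2)) := by
  induction a with
  | nil =>
    intro o t f ho ht
    constructor <;> intro i <;> simp [cntBit, ho, ht]
  | cons num a ih =>
    intro o t f ho ht
    rw [List.foldl_cons]
    have key := ih (Int.land (Int.xor o num) (Int.lnot t))
      (Int.land (Int.xor t num) (Int.lnot (Int.land (Int.xor o num) (Int.lnot t))))
      (fun i => f i + (if num.testBit i then 1 else 0))
      (by
        intro i
        simp only [Int.testBit_land, Int.testBit_lxor, Int.testBit_lnot, ho, ht]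
        rcases Bool.eq_false_or_eq_true (num.testBit i) with hb | hb <;> simp only [hb] <;>
          rcases (show f i % 3 = 0 ∨ f i % 3 = 1 ∨ f i % 3 = 2 by omega) with h | h | h <;>
          simp [h] <;> omega)
      (by
        intro i
        simp only [Int.testBit_land, Int.testBit_lxor, Int.testBit_lnot, ho, ht]
        rcases Bool.eq_false_or_eq_true (num.testBit i) with hb | hb <;> simp only [hb] <;>
          rcases (show f i % 3 = 0 ∨ f i % 3 = 1 ∨ f i % 3 = 2 by omega) with h | h | h <;>
          simp [h] <;> omega)
    constructor <;> intro i
    · rw [key.1 i, cntBit_cons, decide_eq_decide]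
      beta_reduce
      split <;> omega
    · rw [key.2 i, cntBit_cons, decide_eq_decide]
      beta_reduce
      split <;> omega

theorem sumBits_lt (p : Nat → Bool) (k : Nat) :
    (∑ i ∈ Finset.range k, if p i then 2 ^ i else 0) < 2 ^ k := by
  induction k with
  | zero => simp
  | succ k ih =>
    rw [Finset.sum_range_succ]
    have h2 : (2:Nat) ^ (k+1) = 2 ^ k + 2 ^ k := by ring
    split <;> omega

theorem testBit_sumBits (p : Nat → Bool) (k j : Nat) :
    (∑ i ∈ Finset.range k, if p i then 2 ^ i else 0 : Nat).testBit j = (p j && decide (j < k)) := by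
  induction k with
  | zero => simp [Nat.testBit]
  | succ k ih =>
    rw [Finset.sum_range_succ]
    have hlt := sumBits_lt p k
    by_cases hp : p k
    · rw [if_pos hp, add_comm]
      rcases Nat.lt_trichotomy j k with h | h | h
      · rw [Nat.testBit_two_pow_add_gt h, ih]
        simp [h, Nat.lt_succ_of_lt h]
      · subst h
        rw [Nat.testBit_two_pow_add_eq, Nat.testBit_lt_two_pow hlt]
        simp [hp]
      · have : 2 ^ k + (∑ i ∈ Finset.range k, if p i then 2 ^ i else 0) < 2 ^ j := by
          calc 2 ^ k + (∑ i ∈ Finset.range k, if p i then 2 ^ i else 0) < 2 ^ k + 2 ^ k := by omega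
          _ = 2 ^ (k+1) := by ring
          _ ≤ 2 ^ j := Nat.pow_le_pow_right (by omega) (by omega)
        rw [Nat.testBit_lt_two_pow this]
        simp; omega
    · rw [if_neg hp, add_zero]
      rcases Nat.lt_trichotomy j k with h | h | h
      · rw [ih]; simp [h, Nat.lt_succ_of_lt h]
      · subst h
        rw [Nat.testBit_lt_two_pow hlt]
        simp [hp]
      · have : (∑ i ∈ Finset.range k, if p i then 2 ^ i else 0) < 2 ^ j :=
          lt_of_lt_of_le hlt (Nat.pow_le_pow_right (by omega) (by omega))
        rw [Nat.testBit_lt_two_pow this]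
        simp; omega


theorem mask_bits (j : Nat) : Nat.testBit 4294967295 j = decide (j < 32) := by
  rw [show (4294967295 : Nat) = 2 ^ 32 - 1 by norm_num, Nat.testBit_two_pow_sub_one]

theorem final_eq (a : List Int) : find_unique_arr a = find_unique_arr_alt a := by
  rw [A_closed]
  unfold find_unique_arr_alt
  set st := a.foldl (fun (p : Int × Int) num =>
    let ones := Int.land (Int.xor p.1 num) (Int.lnot p.2)
    let twos := Int.land (Int.xor p.2 num) (Int.lnot ones)
    (ones, twos)) ((0 : Int), (0 : Int)) with hst
  have hzero : ∀ i, (0 : Int).testBit i = decide ((fun _ => 0 : Nat → Nat) i % 3 = 1) := by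
    intro i; simp [Int.testBit, Nat.zero_testBit]
  have hzero2 : ∀ i, (0 : Int).testBit i = decide ((fun _ => 0 : Nat → Nat) i % 3 = 2) := by
    intro i; simp [Int.testBit, Nat.zero_testBit]
  have hinv := B_inv a 0 0 (fun _ => 0) hzero hzero2
  have ho : ∀ i, st.1.testBit i = decide (cntBit a i % 3 = 1) := by
    intro i; rw [hst]; simpa using hinv.1 i
  have ht : ∀ i, st.2.testBit i = decide (cntBit a i % 3 = 2) := by
    intro i; rw [hst]; simpa using hinv.2 i
  obtain ⟨K, hK⟩ : ∃ K, Int.land (Int.lor st.1 st.2) 0xFFFFFFFF = Int.ofNat K := by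
    cases h : Int.lor st.1 st.2 with
    | ofNat x => exact ⟨x &&& 4294967295, rfl⟩
    | negSucc x => exact ⟨Nat.ldiff 4294967295 x, rfl⟩
  rw [hK]
  have hKbit : ∀ j, K.testBit j =
      ((decide (cntBit a j % 3 = 1) || decide (cntBit a j % 3 = 2)) && decide (j < 32)) := by
    intro j
    have h1 : K.testBit j = (Int.ofNat K).testBit j := rfl
    rw [h1, ← hK, Int.testBit_land, Int.testBit_lor, ho, ht]
    have h2 : Int.testBit 0xFFFFFFFF j = Nat.testBit 4294967295 j := rfl
    rw [h2, mask_bits]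
  have hsum : (∑ i ∈ Finset.range 32, (if cntBit a i % 3 ≠ 0 then ((2 : Int) ^ i) else 0))
      = ((∑ i ∈ Finset.range 32, (if cntBit a i % 3 ≠ 0 then 2 ^ i else 0) : Nat) : Int) := by
    rw [Nat.cast_sum]
    apply Finset.sum_congr rfl
    intro i _
    split <;> simp
  rw [hsum]
  have : (∑ i ∈ Finset.range 32, (if cntBit a i % 3 ≠ 0 then 2 ^ i else 0) : Nat) = K := by
    apply Nat.eq_of_testBit_eq
    intro j
    have hp : (∑ i ∈ Finset.range 32, (if cntBit a i % 3 ≠ 0 then 2 ^ i else 0) : Nat)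
        = (∑ i ∈ Finset.range 32, (if (fun i => !decide (cntBit a i % 3 = 0)) i then 2 ^ i else 0) : Nat) := by
      apply Finset.sum_congr rfl; intro i _; by_cases h : cntBit a i % 3 = 0 <;> simp [h]
    rw [hp, testBit_sumBits, hKbit]
    rcases (show cntBit a j % 3 = 0 ∨ cntBit a j % 3 = 1 ∨ cntBit a j % 3 = 2 by omega) with h | h | h <;>
      simp [h]
  rw [this]
  rfl

-- ===== VERDICT (by name: the statement is the Claim_ definition above) =====
theorem find_unique_arr_spec : Claim_equal_find_unique_arr := by
  intro a _
  show find_unique_arr a = find_unique_arr_alt a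
  exact final_eq a
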